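-- pv_equiv track=rewrite | github.com/mdrnid/AQG | src/dataset/step1/formatter.py | _find_code_block_ranges
-- ===== SOURCE A (Python) =====
-- from typing import List, Optional
--
-- def _find_code_block_ranges(tokens: List[str]) -> List[tuple[int, int]]:
--     """
--     Kembalikan list (start, end) index token yang berada di dalam code block.
--     Menggunakan state machine per-token untuk menghindari bug char-offset.
--     Token yang mengandung ``` menandai batas code block.
--     """
--     ranges: List[tuple[int, int]] = []
--     in_code = False
--     start = 0
--
--     for i, tok in enumerate(tokens):
--         if "```" in tok:
--             if not in_code:
--                 in_code = True
--                 start = i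
--             else:
--                 ranges.append((start, i))
--                 in_code = False
--
--     # Jika code block tidak ditutup, tandai sampai akhir
--     if in_code:
--         ranges.append((start, len(tokens) - 1))
--
--     return ranges
-- ===== SOURCE B (Python) =====
-- from typing import List
--
-- def _find_code_block_ranges(tokens: List[str]) -> List[tuple[int, int]]:
--     # One pass collects all marker indices; then pair them off two at a time,
--     # a trailing unpaired marker closes at the last token.
--     idx = [i for i, tok in enumerate(tokens) if "```" in tok]
--     ranges: List[tuple[int, int]] = []
--     j = 0
--     while j + 1 < len(idx):
--         ranges.append((idx[j], idx[j + 1]))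
--         j += 2
--     if j < len(idx):
--         ranges.append((idx[j], len(tokens) - 1))
--     return ranges
-- ===== Notes on version B (the rewrite author's own statement) =====
-- stated objective: simpler
-- what changed: Replaces A's per-token in_code/start state machine with a scan that collects all marker indices and a pairing recursion that consumes them two at a time (last unpaired index closes at len(tokens)-1).
import Mathlib
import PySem

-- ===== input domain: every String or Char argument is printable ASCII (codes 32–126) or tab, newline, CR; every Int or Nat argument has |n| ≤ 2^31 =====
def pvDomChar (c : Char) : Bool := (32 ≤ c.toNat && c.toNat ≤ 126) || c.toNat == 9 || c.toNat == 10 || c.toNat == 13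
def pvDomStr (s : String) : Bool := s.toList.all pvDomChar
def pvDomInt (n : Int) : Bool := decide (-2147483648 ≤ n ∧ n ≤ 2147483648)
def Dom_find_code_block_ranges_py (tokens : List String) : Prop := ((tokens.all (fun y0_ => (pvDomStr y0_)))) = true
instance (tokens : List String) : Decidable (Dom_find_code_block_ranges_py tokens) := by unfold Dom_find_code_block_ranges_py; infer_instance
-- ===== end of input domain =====

-- B replaces A's per-token in_code/start state machine by collecting the marker indices
-- in one scan and pairing them off two at a time (simpler decomposition; same cost).

-- ===== PORT A =====
-- Port of A: state machine over enumerate(tokens) with (ranges, in_code, start).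
def find_code_block_ranges_py (tokens : List String) : List (Int × Int) :=
  let st := (PySem.List.enumerate tokens 0).foldl
    (fun (s : List (Int × Int) × Bool × Int) (p : Int × String) =>
      if PySem.Str.isIn "```" p.2 then
        if s.2.1 = false then (s.1, true, p.1)
        else (s.1 ++ [(s.2.2, p.1)], false, s.2.2)
      else s) ([], false, 0)
  if st.2.1 then st.1 ++ [(st.2.2, (tokens.length : Int) - 1)] else st.1

-- ===== PORT B =====
-- helper of B: the pairing loop, consuming markers two at a time (n = len(tokens))
def pvPair (n : Int) : List Int → List (Int × Int)
  | [] => []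
  | [a] => [(a, n - 1)]
  | a :: b :: rest => (a, b) :: pvPair n rest

-- Port of B: collect marker indices, then pair them.
def find_code_block_ranges_py_alt (tokens : List String) : List (Int × Int) :=
  let idx := ((PySem.List.enumerate tokens 0).filter
      (fun p => PySem.Str.isIn "```" p.2)).map (fun p => p.1)
  pvPair (tokens.length : Int) idx

-- ===== PRECONDITION & SPEC =====
def Spec_find_code_block_ranges_py (tokens : List String) (out : List (Int × Int)) : Prop := out = find_code_block_ranges_py_alt tokens
instance (tokens : List String) (out : List (Int × Int)) : Decidable (Spec_find_code_block_ranges_py tokens out) := by unfold Spec_find_code_block_ranges_py; infer_instance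

-- ===== CLAIM (what is proved, stated in full; the proofs are below) =====
def Claim_equal_find_code_block_ranges_py : Prop := ∀ (tokens : List String), Dom_find_code_block_ranges_py tokens → Spec_find_code_block_ranges_py tokens (find_code_block_ranges_py tokens)

-- ===== LEMMAS AND PROOFS =====

-- A's step function, restricted to marker indices.
def pvStep (s : List (Int × Int) × Bool × Int) (i : Int) : List (Int × Int) × Bool × Int :=
  if s.2.1 = false then (s.1, true, i) else (s.1 ++ [(s.2.2, i)], false, s.2.2)

-- A's final "close the open block" step.
def pvFinish (n : Int) (st : List (Int × Int) × Bool × Int) : List (Int × Int) :=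
  if st.2.1 then st.1 ++ [(st.2.2, n - 1)] else st.1

-- Folding A's step over the enumerated tokens only moves on marker tokens.
theorem pvFold_filter (l : List (Int × String)) :
    ∀ (s : List (Int × Int) × Bool × Int),
    l.foldl
      (fun (s : List (Int × Int) × Bool × Int) (p : Int × String) =>
        if PySem.Str.isIn "```" p.2 then
          if s.2.1 = false then (s.1, true, p.1)
          else (s.1 ++ [(s.2.2, p.1)], false, s.2.2)
        else s) s
    = ((l.filter (fun p => PySem.Str.isIn "```" p.2)).map (fun p => p.1)).foldl pvStep s := by
  induction l with
  | nil => intro s; rfl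
  | cons p t ih =>
      intro s
      simp only [List.foldl_cons, List.filter_cons]
      by_cases h : PySem.Str.isIn "```" p.2 = true
      · rw [if_pos h, if_pos h, List.map_cons, List.foldl_cons, ih]
        rfl
      · rw [if_neg h, if_neg h]
        exact ih s

-- Finishing A's fold from a not-in-code state yields the pairing of the marker indices.
theorem pvFold_pair (n : Int) :
    ∀ (idx : List Int) (ranges : List (Int × Int)) (st0 : Int),
    pvFinish n (idx.foldl pvStep (ranges, false, st0)) = ranges ++ pvPair n idx
  | [], ranges, st0 => by simp [pvPair, pvFinish]
  | [a], ranges, st0 => by simp [pvPair, pvFinish, pvStep]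
  | a :: b :: rest, ranges, st0 => by
      have ih := pvFold_pair n rest (ranges ++ [(a, b)]) a
      simp only [List.foldl_cons]
      rw [show pvStep (ranges, false, st0) a = (ranges, true, a) from rfl,
          show pvStep (ranges, true, a) b = (ranges ++ [(a, b)], false, a) from rfl, ih]
      simp [pvPair]

-- ===== VERDICT (by name: the statement is the Claim_ definition above) =====
theorem find_code_block_ranges_py_spec : Claim_equal_find_code_block_ranges_py := by
  intro tokens _
  unfold Spec_find_code_block_ranges_py find_code_block_ranges_py find_code_block_ranges_py_alt
  rw [show ∀ st, (if (st : List (Int × Int) × Bool × Int).2.1 then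
        st.1 ++ [(st.2.2, (tokens.length : Int) - 1)] else st.1) = pvFinish (tokens.length : Int) st
      from fun _ => rfl,
    pvFold_filter, pvFold_pair]
  rfl
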